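-- pv_equiv track=rewrite | github.com/inab/bioconda-importer | main.py | check_tool_host_target
-- ===== SOURCE A (Python) =====
-- def check_tool_host_target(tool_requirements, type_):
--     '''
--     Else-If (python OR perl OR r-base) in requirements.host:
--             If (python OR perl OR r-base) in requirements.run:
--                 Lib
--     '''
--     if tool_requirements.get('host'):
--         for host in tool_requirements['host']:
--             if True in [lang in host for lang in ['r-base', 'python','perl'] ]:
--
--                 if tool_requirements.get('run'):
--                     for run in tool_requirements.get('run'):
--                         if True in [lang in run for lang in ['r-base', 'python','perl'] ]:
--                             type_.add('lib')
--
--     return(type_)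
-- ===== SOURCE B (Python) =====
-- LANGS = ('r-base', 'python', 'perl')
--
--
-- def _has_lang(entries):
--     # truthy guard (None or empty list -> False), then one flat scan
--     return bool(entries) and any(lang in entry for entry in entries for lang in LANGS)
--
--
-- def check_tool_host_target(tool_requirements, type_):
--     host_has = _has_lang(tool_requirements.get('host'))
--     run_has = _has_lang(tool_requirements.get('run'))
--     if host_has and run_has:
--         type_.add('lib')
--     return type_
-- ===== Notes on version B (the rewrite author's own statement) =====
-- stated objective: simpler
-- what changed: Replaces A's nested host-loop with a run-loop (and set-add) inside it by two independent flat existence scans (host_has, run_has) computed up front, followed by a single conditional add of 'lib'.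
import Mathlib
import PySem

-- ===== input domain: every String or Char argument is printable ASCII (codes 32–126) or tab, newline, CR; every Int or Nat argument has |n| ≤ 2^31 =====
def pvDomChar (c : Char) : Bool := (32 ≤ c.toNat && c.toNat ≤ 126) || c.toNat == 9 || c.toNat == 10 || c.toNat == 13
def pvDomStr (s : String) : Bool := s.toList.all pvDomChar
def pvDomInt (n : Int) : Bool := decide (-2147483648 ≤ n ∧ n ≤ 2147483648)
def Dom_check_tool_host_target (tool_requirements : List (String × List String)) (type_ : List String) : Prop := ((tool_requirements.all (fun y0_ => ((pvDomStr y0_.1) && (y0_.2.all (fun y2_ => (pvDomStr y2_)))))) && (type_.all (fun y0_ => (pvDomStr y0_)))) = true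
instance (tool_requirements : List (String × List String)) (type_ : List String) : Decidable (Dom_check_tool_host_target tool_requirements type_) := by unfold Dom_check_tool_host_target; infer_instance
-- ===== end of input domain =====

-- B replaces A's nested host/run loops by two independent flat existence scans and one
-- conditional set-add ('simpler'); both A and B mutate the set type_ in place in Python
-- (the same mutation), the equivalence proved is about the returned set.


-- ===== PORT A =====
-- ['r-base', 'python', 'perl']
def pvLangs : List String := ["r-base", "python", "perl"]

def check_tool_host_target (tool_requirements : List (String × List String)) (type_ : List String) : List String :=
  -- if tool_requirements.get('host'):   (truthy: present and nonempty)
  match List.lookup "host" tool_requirements with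
  | none => type_
  | some hosts =>
    if !hosts.isEmpty then
      -- for host in tool_requirements['host']: …
      hosts.foldl (fun st host =>
        -- if True in [lang in host for lang in [...]]:
        if (pvLangs.map (fun lang => PySem.Str.isIn lang host)).contains true then
          -- if tool_requirements.get('run'):
          match List.lookup "run" tool_requirements with
          | none => st
          | some runs =>
            if !runs.isEmpty then
              -- for run in tool_requirements.get('run'): …
              runs.foldl (fun st2 run =>
                if (pvLangs.map (fun lang => PySem.Str.isIn lang run)).contains true then
                  PySem.Set.add st2 "lib"
                else st2) st
            else st
        else st) type_
    else type_

-- ===== PORT B =====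
-- bool(entries) and any(lang in entry for entry in entries for lang in LANGS)
def pvHasLang (entries : Option (List String)) : Bool :=
  match entries with
  | none => false
  | some es => !es.isEmpty && es.any (fun e => pvLangs.any (fun lang => PySem.Str.isIn lang e))

def check_tool_host_target_alt (tool_requirements : List (String × List String)) (type_ : List String) : List String :=
  let host_has := pvHasLang (List.lookup "host" tool_requirements)
  let run_has := pvHasLang (List.lookup "run" tool_requirements)
  if host_has && run_has then PySem.Set.add type_ "lib" else type_

-- ===== PRECONDITION & SPEC =====
def Spec_check_tool_host_target (tool_requirements : List (String × List String)) (type_ : List String) (out : List String) : Prop := out = check_tool_host_target_alt tool_requirements type_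
instance (tool_requirements : List (String × List String)) (type_ : List String) (out : List String) : Decidable (Spec_check_tool_host_target tool_requirements type_ out) := by unfold Spec_check_tool_host_target; infer_instance

-- ===== CLAIM (what is proved, stated in full; the proofs are below) =====
def Claim_equal_check_tool_host_target : Prop := ∀ (tool_requirements : List (String × List String)) (type_ : List String), Dom_check_tool_host_target tool_requirements type_ → Spec_check_tool_host_target tool_requirements type_ (check_tool_host_target tool_requirements type_)

-- ===== LEMMAS AND PROOFS =====

theorem pv_add_idem (s : List String) (x : String) :
    PySem.Set.add (PySem.Set.add s x) x = PySem.Set.add s x := by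
  simp [PySem.Set.add]
  split_ifs <;> simp_all

-- folding a conditional set-add collapses to a single conditional add
theorem pv_fold_add (p : String → Bool) (xs : List String) (s : List String) :
    xs.foldl (fun st x => if p x then PySem.Set.add st "lib" else st) s
      = if xs.any p then PySem.Set.add s "lib" else s := by
  induction xs generalizing s with
  | nil => simp
  | cons a xs ih =>
    by_cases ha : p a
    · simp only [List.foldl_cons, ha, if_pos, List.any_cons, Bool.true_or, ih]
      split
      · exact pv_add_idem s "lib"
      · rfl
    · simp [ha, ih]

-- same, with the add itself guarded by a condition b independent of the loop
theorem pv_fold_add_guard (q : String → Bool) (b : Bool) (xs s : List String) :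
    xs.foldl (fun st x => if q x then (if b then PySem.Set.add st "lib" else st) else st) s
      = if xs.any q && b then PySem.Set.add s "lib" else s := by
  cases b with
  | true => simpa using pv_fold_add q xs s
  | false => simp [List.foldl_fixed]

-- ===== VERDICT (by name: the statement is the Claim_ definition above) =====
theorem check_tool_host_target_spec : Claim_equal_check_tool_host_target := by
  intro tr type_ _
  unfold Spec_check_tool_host_target check_tool_host_target check_tool_host_target_alt pvHasLang
  cases hh : List.lookup "host" tr with
  | none => simp
  | some hosts =>
    cases hr : List.lookup "run" tr with
    | none =>
      simp [List.foldl_fixed]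
    | some runs =>
      by_cases hre : runs.isEmpty
      · simp [hre, List.foldl_fixed]
      · by_cases hhe : hosts.isEmpty
        · simp [hhe]
        · simp only [hhe, hre, Bool.not_false, if_pos, Bool.true_and,
            pv_fold_add (fun run => (pvLangs.map (fun lang => PySem.Str.isIn lang run)).contains true) runs,
            pv_fold_add_guard]
          simp
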